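-- pv_equiv track=rewrite | github.com/ilamgumaran/Project-Aadhiyandham | update_breadcrumbs.py | get_breadcrumbs
-- ===== SOURCE A (Python) =====
-- master_sequence = [
--     "01_The_Journey/01_Rationale_and_Importance",
--     "01_The_Journey/02_Orienting_and_Positioning",
--     "01_The_Journey/03_Direction_and_Orientation_Basics",
--     "01_The_Journey/04_Terrestrial_Navigation/01_Rationale_and_Importance",
--     "01_The_Journey/04_Terrestrial_Navigation/02_Map_and_Compass_Guide",
--     "01_The_Journey/04_Terrestrial_Navigation/03_Celestial_Navigation_Sun",
--     "01_The_Journey/04_Terrestrial_Navigation/04_Non_Motorized_Transit_Routes",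
--     "01_The_Journey/05_Essential_Packing_List",
--     "02_The_Site/01_Rationale_and_Importance",
--     "02_The_Site/02_Topographical_Resilience",
--     "02_The_Site/03_Solar_and_Thermal_Balance",
--     "02_The_Site/04_Water_Sovereignty_and_Hydrams",
--     "02_The_Site/05_Initial_Site_Layout",
--     "03_The_Arrival/01_Rationale_and_Importance",
--     "03_The_Arrival/02_Bio_Security_and_Water",
--     "03_The_Arrival/03_Shelter_and_Thermal_Grounding",
--     "03_The_Arrival/04_Emergency_Nutrition",
--     "03_The_Arrival/05_Psychological_Grounding",
--     "03_The_Arrival/06_Emergency_Sanitation",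
--     "04_The_Body/01_Rationale_and_Importance",
--     "04_The_Body/02_Biochemical_Signals",
--     "04_The_Body/03_Temperate_Antibiotics",
--     "05_The_Mind/01_Rationale_and_Importance",
--     "05_The_Mind/02_Linguistic_Precision",
--     "05_The_Mind/03_Restorative_Architecture",
--     "06_The_Ecosystem/01_Rationale_and_Importance",
--     "06_The_Ecosystem/02_Soil_Sovereignty",
--     "06_The_Ecosystem/03_The_Seed_Bank",
--     "06_The_Ecosystem/04_Livestock_and_Mechanical_Animals",
--     "07_The_Mechanics/01_Rationale_and_Importance",
--     "07_The_Mechanics/02_Mechanical_Power",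
--     "07_The_Mechanics/03_Low_Tech_Mobility",
--     "07_The_Mechanics/04_Material_Synthesis_and_Recycling",
--     "08_The_Society/01_Rationale_and_Importance",
--     "08_The_Society/02_Recycling_Cliff",
--     "08_The_Society/03_Consensus_Models",
--     "09_The_Next_Generation/01_Rationale_and_Importance",
--     "09_The_Next_Generation/02_English_Language_Lessons",
--     "09_The_Next_Generation/03_Tamil_Language_Lessons",
--     "09_The_Next_Generation/04_Metrics_and_Measurement",
--     "09_The_Next_Generation/05_Mathematics_and_Geometry",
--     "09_The_Next_Generation/06_Foundational_Science",
--     "09_The_Next_Generation/07_Philosophy_and_Thought_Experiments",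
--     "10_The_Archive/01_Rationale_and_Importance",
--     "10_The_Archive/02_Laws_of_Energy",
--     "10_The_Archive/03_Limiting_Factors",
--     "11_The_Horizon/01_Rationale_and_Importance",
--     "11_The_Horizon/02_Glassmaking",
--     "11_The_Horizon/03_Crucible_Steel"
-- ]
--
-- def format_label(text):
--     return text.replace('_', ' ').title()
--
-- def get_breadcrumbs(current_path, index):
--     parts = current_path.split('/')
--     depth = len(parts) - 1
--     root_rel = '../' * depth
--
--     # Path trail
--     trail = [f'<a href="{root_rel}index.html">Index</a>']
--     current_acc = ""
--     for i, part in enumerate(parts[:-1]):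
--         current_acc += part + "/"
--         label = format_label(part)
--         # Assuming rationale is the index of each subdir
--         link = f"{root_rel}{current_acc}01_Rationale_and_Importance.html"
--         trail.append(f'<a href="{link}">{label}</a>')
--
--     # Current page number
--     page_num = f"Page {index + 1} of {len(master_sequence)}"
--     trail.append(f'<span>{format_label(parts[-1])}</span>')
--
--     return f'<div class="breadcrumbs">{" &gt; ".join(trail)} | <strong>{page_num}</strong></div>'
-- ===== SOURCE B (Python) =====
-- master_sequence = [
--     "01_The_Journey/01_Rationale_and_Importance",
--     "01_The_Journey/02_Orienting_and_Positioning",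
--     "01_The_Journey/03_Direction_and_Orientation_Basics",
--     "01_The_Journey/04_Terrestrial_Navigation/01_Rationale_and_Importance",
--     "01_The_Journey/04_Terrestrial_Navigation/02_Map_and_Compass_Guide",
--     "01_The_Journey/04_Terrestrial_Navigation/03_Celestial_Navigation_Sun",
--     "01_The_Journey/04_Terrestrial_Navigation/04_Non_Motorized_Transit_Routes",
--     "01_The_Journey/05_Essential_Packing_List",
--     "02_The_Site/01_Rationale_and_Importance",
--     "02_The_Site/02_Topographical_Resilience",
--     "02_The_Site/03_Solar_and_Thermal_Balance",
--     "02_The_Site/04_Water_Sovereignty_and_Hydrams",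
--     "02_The_Site/05_Initial_Site_Layout",
--     "03_The_Arrival/01_Rationale_and_Importance",
--     "03_The_Arrival/02_Bio_Security_and_Water",
--     "03_The_Arrival/03_Shelter_and_Thermal_Grounding",
--     "03_The_Arrival/04_Emergency_Nutrition",
--     "03_The_Arrival/05_Psychological_Grounding",
--     "03_The_Arrival/06_Emergency_Sanitation",
--     "04_The_Body/01_Rationale_and_Importance",
--     "04_The_Body/02_Biochemical_Signals",
--     "04_The_Body/03_Temperate_Antibiotics",
--     "05_The_Mind/01_Rationale_and_Importance",
--     "05_The_Mind/02_Linguistic_Precision",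
--     "05_The_Mind/03_Restorative_Architecture",
--     "06_The_Ecosystem/01_Rationale_and_Importance",
--     "06_The_Ecosystem/02_Soil_Sovereignty",
--     "06_The_Ecosystem/03_The_Seed_Bank",
--     "06_The_Ecosystem/04_Livestock_and_Mechanical_Animals",
--     "07_The_Mechanics/01_Rationale_and_Importance",
--     "07_The_Mechanics/02_Mechanical_Power",
--     "07_The_Mechanics/03_Low_Tech_Mobility",
--     "07_The_Mechanics/04_Material_Synthesis_and_Recycling",
--     "08_The_Society/01_Rationale_and_Importance",
--     "08_The_Society/02_Recycling_Cliff",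
--     "08_The_Society/03_Consensus_Models",
--     "09_The_Next_Generation/01_Rationale_and_Importance",
--     "09_The_Next_Generation/02_English_Language_Lessons",
--     "09_The_Next_Generation/03_Tamil_Language_Lessons",
--     "09_The_Next_Generation/04_Metrics_and_Measurement",
--     "09_The_Next_Generation/05_Mathematics_and_Geometry",
--     "09_The_Next_Generation/06_Foundational_Science",
--     "09_The_Next_Generation/07_Philosophy_and_Thought_Experiments",
--     "10_The_Archive/01_Rationale_and_Importance",
--     "10_The_Archive/02_Laws_of_Energy",
--     "10_The_Archive/03_Limiting_Factors",
--     "11_The_Horizon/01_Rationale_and_Importance",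
--     "11_The_Horizon/02_Glassmaking",
--     "11_The_Horizon/03_Crucible_Steel"
-- ]
--
--
-- def format_label(text):
--     # One fused pass: map '_' to ' ' and title-case in the same scan,
--     # instead of replace() followed by title().
--     out = []
--     prev_cased = False
--     for ch in text:
--         if ch == '_':
--             ch = ' '
--         out.append(ch.lower() if prev_cased else ch.upper())
--         prev_cased = ch.isalpha()
--     return ''.join(out)
--
--
-- def get_breadcrumbs(current_path, index):
--     parts = current_path.split('/')
--     root_rel = '../' * (len(parts) - 1)
--     # No running accumulator: each ancestor link's prefix is a join of a slice.
--     crumbs = [f'<a href="{root_rel}index.html">Index</a>']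
--     crumbs += [
--         f'<a href="{root_rel}{"/".join(parts[:i + 1])}/01_Rationale_and_Importance.html">{format_label(parts[i])}</a>'
--         for i in range(len(parts) - 1)
--     ]
--     crumbs.append(f'<span>{format_label(parts[-1])}</span>')
--     return f'<div class="breadcrumbs">{" &gt; ".join(crumbs)} | <strong>Page {index + 1} of {len(master_sequence)}</strong></div>'
-- ===== Notes on version B (the rewrite author's own statement) =====
-- stated objective: alternative
-- what changed: B drops the running current_acc accumulator (each ancestor link's prefix is '/'.join of a path slice, the trail built as a comprehension) and fuses format_label's replace('_',' ')+title() two-pass into one single scan with a prev-cased flag.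
import Mathlib
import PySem

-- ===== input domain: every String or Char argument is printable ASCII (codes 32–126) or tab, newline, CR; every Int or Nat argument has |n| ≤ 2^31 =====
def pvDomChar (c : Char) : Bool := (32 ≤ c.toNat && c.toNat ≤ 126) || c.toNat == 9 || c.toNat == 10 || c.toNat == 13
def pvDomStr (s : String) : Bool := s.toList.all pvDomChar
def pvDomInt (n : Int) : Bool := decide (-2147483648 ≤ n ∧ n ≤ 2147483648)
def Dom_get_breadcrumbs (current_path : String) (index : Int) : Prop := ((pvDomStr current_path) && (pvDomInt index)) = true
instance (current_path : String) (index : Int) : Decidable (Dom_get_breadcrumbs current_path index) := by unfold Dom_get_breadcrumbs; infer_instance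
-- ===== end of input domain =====

-- B drops A's running `current_acc` accumulator (each ancestor link prefix is a join of a
-- path slice, the trail a comprehension) and fuses replace('_',' ')+title() into one scan;
-- objective: alternative decomposition, same cost.

-- shared module constant (both Pythons only use its length)
def master_sequence : List String := [
  "01_The_Journey/01_Rationale_and_Importance",
  "01_The_Journey/02_Orienting_and_Positioning",
  "01_The_Journey/03_Direction_and_Orientation_Basics",
  "01_The_Journey/04_Terrestrial_Navigation/01_Rationale_and_Importance",
  "01_The_Journey/04_Terrestrial_Navigation/02_Map_and_Compass_Guide",
  "01_The_Journey/04_Terrestrial_Navigation/03_Celestial_Navigation_Sun",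
  "01_The_Journey/04_Terrestrial_Navigation/04_Non_Motorized_Transit_Routes",
  "01_The_Journey/05_Essential_Packing_List",
  "02_The_Site/01_Rationale_and_Importance",
  "02_The_Site/02_Topographical_Resilience",
  "02_The_Site/03_Solar_and_Thermal_Balance",
  "02_The_Site/04_Water_Sovereignty_and_Hydrams",
  "02_The_Site/05_Initial_Site_Layout",
  "03_The_Arrival/01_Rationale_and_Importance",
  "03_The_Arrival/02_Bio_Security_and_Water",
  "03_The_Arrival/03_Shelter_and_Thermal_Grounding",
  "03_The_Arrival/04_Emergency_Nutrition",
  "03_The_Arrival/05_Psychological_Grounding",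
  "03_The_Arrival/06_Emergency_Sanitation",
  "04_The_Body/01_Rationale_and_Importance",
  "04_The_Body/02_Biochemical_Signals",
  "04_The_Body/03_Temperate_Antibiotics",
  "05_The_Mind/01_Rationale_and_Importance",
  "05_The_Mind/02_Linguistic_Precision",
  "05_The_Mind/03_Restorative_Architecture",
  "06_The_Ecosystem/01_Rationale_and_Importance",
  "06_The_Ecosystem/02_Soil_Sovereignty",
  "06_The_Ecosystem/03_The_Seed_Bank",
  "06_The_Ecosystem/04_Livestock_and_Mechanical_Animals",
  "07_The_Mechanics/01_Rationale_and_Importance",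
  "07_The_Mechanics/02_Mechanical_Power",
  "07_The_Mechanics/03_Low_Tech_Mobility",
  "07_The_Mechanics/04_Material_Synthesis_and_Recycling",
  "08_The_Society/01_Rationale_and_Importance",
  "08_The_Society/02_Recycling_Cliff",
  "08_The_Society/03_Consensus_Models",
  "09_The_Next_Generation/01_Rationale_and_Importance",
  "09_The_Next_Generation/02_English_Language_Lessons",
  "09_The_Next_Generation/03_Tamil_Language_Lessons",
  "09_The_Next_Generation/04_Metrics_and_Measurement",
  "09_The_Next_Generation/05_Mathematics_and_Geometry",
  "09_The_Next_Generation/06_Foundational_Science",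
  "09_The_Next_Generation/07_Philosophy_and_Thought_Experiments",
  "10_The_Archive/01_Rationale_and_Importance",
  "10_The_Archive/02_Laws_of_Energy",
  "10_The_Archive/03_Limiting_Factors",
  "11_The_Horizon/01_Rationale_and_Importance",
  "11_The_Horizon/02_Glassmaking",
  "11_The_Horizon/03_Crucible_Steel"]

-- '../' * n  (Python string repetition, n ≥ 0 here)
def strTimes (cs : List Char) (n : Nat) : List Char := (List.replicate n cs).flatten

-- Python `c` is "cased"; exact on the printable-ASCII domain (only a-z A-Z are cased there)
def pyIsCased (c : Char) : Bool := c.isAlpha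

-- ===== PORT A =====
-- str.title(), hand-ported (PySem has no title); exact on the printable-ASCII domain:
-- a cased char is uppercased after a non-cased char, lowercased after a cased one
-- (Char.toUpper/toLower are identities on non-cased ASCII, so the map is uniform).
def pyTitleGo : List Char → Bool → List Char
  | [], _ => []
  | c :: t, prev => (if prev then c.toLower else c.toUpper) :: pyTitleGo t (pyIsCased c)

def pyTitle (cs : List Char) : List Char := pyTitleGo cs false

-- A's format_label: replace('_', ' ') then title()
def format_label (text : List Char) : List Char :=
  pyTitle (PySem.Chars.replace text ['_'] [' '])

-- A's loop over parts[:-1] with the running accumulator current_acc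
def aTrailLoop (rootRel : List Char) : List (List Char) → List Char → List (List Char)
  | [], _ => []
  | p :: rest, acc =>
      let acc' := acc ++ p ++ ['/']
      let link := rootRel ++ acc' ++ "01_Rationale_and_Importance.html".toList
      ("<a href=\"".toList ++ link ++ "\">".toList ++ format_label p ++ "</a>".toList)
        :: aTrailLoop rootRel rest acc'

def get_breadcrumbs (current_path : String) (index : Int) : String :=
  let parts := PySem.Chars.splitOn current_path.toList ['/']
  let depth := parts.length - 1
  let rootRel := strTimes "../".toList depth
  let trail := ("<a href=\"".toList ++ rootRel ++ "index.html\">Index</a>".toList)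
      :: aTrailLoop rootRel (PySem.List.slice parts none (some (-1))) []
  let pageNum := "Page ".toList ++ PySem.Int.toChars (index + 1) ++ " of ".toList
      ++ PySem.Int.toChars (master_sequence.length : Int)
  let trail2 := trail ++
      [("<span>".toList ++ format_label (PySem.List.pyGetD parts (-1) []) ++ "</span>".toList)]
  String.ofList ("<div class=\"breadcrumbs\">".toList
      ++ PySem.Chars.join " &gt; ".toList trail2
      ++ " | <strong>".toList ++ pageNum ++ "</strong></div>".toList)

-- ===== PORT B =====
-- B's format_label: one fused scan, '_'→' ' and title-casing together
def bLabelGo : List Char → Bool → List Char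
  | [], _ => []
  | c :: t, prev =>
      let d := if c = '_' then ' ' else c
      (if prev then d.toLower else d.toUpper) :: bLabelGo t (pyIsCased d)

def format_label_alt (text : List Char) : List Char := bLabelGo text false

def get_breadcrumbs_alt (current_path : String) (index : Int) : String :=
  let parts := PySem.Chars.splitOn current_path.toList ['/']
  let rootRel := strTimes "../".toList (parts.length - 1)
  let crumbs := ("<a href=\"".toList ++ rootRel ++ "index.html\">Index</a>".toList)
      :: (PySem.List.pyRange 0 ((parts.length : Int) - 1) 1).map (fun i =>
          "<a href=\"".toList ++ rootRel
            ++ PySem.Chars.join ['/'] (PySem.List.slice parts none (some (i + 1)))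
            ++ "/01_Rationale_and_Importance.html\">".toList
            ++ format_label_alt (PySem.List.pyGetD parts i []) ++ "</a>".toList)
  let crumbs2 := crumbs ++
      [("<span>".toList ++ format_label_alt (PySem.List.pyGetD parts (-1) []) ++ "</span>".toList)]
  String.ofList ("<div class=\"breadcrumbs\">".toList
      ++ PySem.Chars.join " &gt; ".toList crumbs2
      ++ " | <strong>Page ".toList ++ PySem.Int.toChars (index + 1) ++ " of ".toList
      ++ PySem.Int.toChars (master_sequence.length : Int) ++ "</strong></div>".toList)

-- ===== PRECONDITION & SPEC =====
def Spec_get_breadcrumbs (current_path : String) (index : Int) (out : String) : Prop := out = get_breadcrumbs_alt current_path index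
instance (current_path : String) (index : Int) (out : String) : Decidable (Spec_get_breadcrumbs current_path index out) := by unfold Spec_get_breadcrumbs; infer_instance

-- ===== CLAIM (what is proved, stated in full; the proofs are below) =====
def Claim_equal_get_breadcrumbs : Prop := ∀ (current_path : String) (index : Int), Dom_get_breadcrumbs current_path index → Spec_get_breadcrumbs current_path index (get_breadcrumbs current_path index)

-- ===== LEMMAS AND PROOFS =====

def subChar (c : Char) : Char := if c = '_' then ' ' else c

lemma replace_go_underscore (s : List Char) : ∀ (fuel : Nat) (acc : List Char),
    s.length ≤ fuel →
    PySem.Chars.replace.go ['_'] [' '] fuel s acc = acc.reverse ++ s.map subChar := by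
  induction s with
  | nil =>
      intro fuel acc _
      cases fuel <;> simp [PySem.Chars.replace.go]
  | cons c t ih =>
      intro fuel acc h
      cases fuel with
      | zero => simp at h
      | succ f =>
        by_cases hc : c = '_'
        · subst hc
          simp [PySem.Chars.replace.go, List.isPrefixOf, ih f (' ' :: acc) (by simpa using h),
            subChar]
        · have hp : List.isPrefixOf ['_'] (c :: t) = false := by
            simp [List.isPrefixOf]; exact fun h' => (hc h'.symm).elim
          simp [PySem.Chars.replace.go, hp, ih f (c :: acc) (by simpa using h), subChar, hc]

lemma replace_underscore (s : List Char) :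
    PySem.Chars.replace s ['_'] [' '] = s.map subChar := by
  simp [PySem.Chars.replace, replace_go_underscore s s.length [] le_rfl]

lemma titleGo_map_sub (s : List Char) : ∀ prev,
    pyTitleGo (s.map subChar) prev = bLabelGo s prev := by
  induction s with
  | nil => intro prev; simp [pyTitleGo, bLabelGo]
  | cons c t ih =>
      intro prev
      simp only [List.map_cons, pyTitleGo, bLabelGo, ih, subChar]

lemma format_label_eq (s : List Char) : format_label s = format_label_alt s := by
  simp [format_label, format_label_alt, pyTitle, replace_underscore, titleGo_map_sub]

lemma slice_neg_one (xs : List (List Char)) :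
    PySem.List.slice xs none (some (-1)) = xs.dropLast := by
  rcases xs with _ | ⟨a, l⟩
  · simp [PySem.List.slice]
  · simp only [PySem.List.slice, PySem.List.clampIdx]
    norm_num
    rw [List.dropLast_eq_take]
    congr 1

lemma slice_take (xs : List (List Char)) (k : Nat) :
    PySem.List.slice xs none (some ((k : Int) + 1)) = xs.take (k + 1) := by
  simp only [PySem.List.slice, PySem.List.clampIdx]
  have h : ¬ ((k : Int) + 1 < 0) := by omega
  simp [h, List.take_eq_take_iff]

-- the link-tag of B at position i over the ancestor list qs, shifted by the prefix `acc`
def bTag (r acc : List Char) (qs : List (List Char)) (i : Nat) : List Char :=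
  "<a href=\"".toList ++ r ++ acc
    ++ PySem.Chars.join ['/'] (qs.take (i + 1))
    ++ "/01_Rationale_and_Importance.html\">".toList
    ++ format_label_alt (qs.getD i []) ++ "</a>".toList

lemma join_cons_ne_nil (p : List Char) (qs : List (List Char)) (h : qs ≠ []) :
    PySem.Chars.join ['/'] (p :: qs) = p ++ ['/'] ++ PySem.Chars.join ['/'] qs := by
  rcases qs with _ | ⟨q, l⟩
  · exact absurd rfl h
  · exact PySem.Chars.join_cons_cons ['/'] p q l

lemma aTrailLoop_eq (r : List Char) (qs : List (List Char)) : ∀ acc,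
    aTrailLoop r qs acc = (List.range qs.length).map (bTag r acc qs) := by
  induction qs with
  | nil => intro acc; simp [aTrailLoop]
  | cons p rest ih =>
      intro acc
      simp only [aTrailLoop, List.length_cons, List.range_succ_eq_map, List.map_cons,
        List.map_map, ih (acc ++ p ++ ['/'])]
      refine List.cons_eq_cons.mpr ⟨?_, ?_⟩
      · simp [bTag, format_label_eq, PySem.Chars.join_singleton]
      · apply List.map_congr_left
        intro i hi
        simp only [List.mem_range] at hi
        simp only [Function.comp, bTag, List.take_succ_cons, List.getD_cons_succ]
        have hne : rest.take (i + 1) ≠ [] := by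
          intro hcontr
          rcases List.take_eq_nil_iff.mp hcontr with h | h
          · omega
          · subst h; simp at hi
        rw [join_cons_ne_nil p (rest.take (i + 1)) hne]
        simp

lemma pyGetD_dropLast (xs : List (List Char)) (k : Nat) (hk : k < xs.length - 1) :
    PySem.List.pyGetD xs (k : Int) [] = xs.dropLast.getD k [] := by
  rw [PySem.List.pyGetD_natCast, List.dropLast_eq_take]
  rcases h : xs[k]? with _ | v
  · rw [List.getElem?_eq_none_iff] at h; omega
  · have h2 : (xs.take (xs.length - 1))[k]? = some v := by
      rw [List.getElem?_take_of_lt (by omega)]; exact h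
    simp [List.getD, h, h2]

lemma take_dropLast (xs : List (List Char)) (k : Nat) (hk : k < xs.length - 1) :
    xs.take (k + 1) = xs.dropLast.take (k + 1) := by
  rw [List.dropLast_eq_take, List.take_take]
  congr 1
  omega

lemma ancestors_eq (ps : List (List Char)) (r : List Char) :
    aTrailLoop r ps.dropLast [] = List.map (fun i =>
      "<a href=\"".toList ++ r
        ++ PySem.Chars.join ['/'] (PySem.List.slice ps none (some (i + 1)))
        ++ "/01_Rationale_and_Importance.html\">".toList
        ++ format_label_alt (PySem.List.pyGetD ps i []) ++ "</a>".toList)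
      (PySem.List.pyRange 0 ((ps.length : Int) - 1) 1) := by
  rw [aTrailLoop_eq, PySem.List.pyRange_one, List.map_map]
  have hlen : (((ps.length : Int) - 1) - 0).toNat = ps.dropLast.length := by
    simp
  rw [hlen]
  apply List.map_congr_left
  intro k hk
  simp only [List.mem_range, List.length_dropLast] at hk
  simp only [bTag, Function.comp_apply, zero_add, List.append_nil]
  rw [slice_take, pyGetD_dropLast ps k (by omega), take_dropLast ps k (by omega)]

lemma lit_fuse (rest : List Char) :
    " | <strong>".toList ++ ("Page ".toList ++ rest) = " | <strong>Page ".toList ++ rest := by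
  rw [← List.append_assoc]
  rfl

theorem breadcrumbs_eq (current_path : String) (index : Int) :
    get_breadcrumbs current_path index = get_breadcrumbs_alt current_path index := by
  simp only [get_breadcrumbs, get_breadcrumbs_alt, slice_neg_one, format_label_eq, ancestors_eq]
  simp only [List.append_assoc, lit_fuse]

-- ===== VERDICT (by name: the statement is the Claim_ definition above) =====
theorem get_breadcrumbs_spec : Claim_equal_get_breadcrumbs := by
  intro current_path index _
  unfold Spec_get_breadcrumbs
  exact breadcrumbs_eq current_path index
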